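-- pv_equiv track=rewrite | github.com/KennethEmerson/MPI_parallel_image_classifier | aux_functions.py | create_teams
-- ===== SOURCE A (Python) =====
-- import math
-- from operator import itemgetter
--
-- def create_teams(world_size,team_size):
--     """creates list of teams in which each team consists of a certain number of node indexes/ranks
--        the last team can be less than team size if world_size%team_size != 0
--
--     Args:
--         world_size (int): the total number of nodes available to be divided into teams
--         team_size (int): max size per team
--
--     Returns:
--         [list]: list of teams in which each team is a list of node indexes/ranks
--         [list]: list of preprocess nodes (first node in each team)
--         [list]: list of predictor nodes
--     """
--
--     list_of_nodes = [*range(2,world_size)]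
--     nbr_of_teams = math.ceil((world_size-2) / team_size)
--     team_list = [list_of_nodes[i * team_size:(i+1) * team_size] for i in range(nbr_of_teams)]
--     preprocess_node_list = (list(map(itemgetter(0), team_list)))
--     predict_node_list = [i for i in [*range(2,world_size,1)] if i not in preprocess_node_list]
--
--     assert len(team_list) > 0
--     return team_list,preprocess_node_list,predict_node_list
-- ===== SOURCE B (Python) =====
-- import math
--
--
-- def create_teams(world_size, team_size):
--     """Single nested pass: walk the ranks once, cutting a new team every
--     team_size ranks and classifying each rank by its position in its team
--     (first -> preprocess, rest -> predict)."""
--     nbr_of_teams = math.ceil((world_size - 2) / team_size)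
--     team_list = []
--     preprocess_node_list = []
--     predict_node_list = []
--     rank = 2
--     for _t in range(nbr_of_teams):
--         team = []
--         for j in range(team_size):
--             if rank >= world_size:
--                 break
--             team.append(rank)
--             if j == 0:
--                 preprocess_node_list.append(rank)
--             else:
--                 predict_node_list.append(rank)
--             rank += 1
--         team_list.append(team)
--     assert len(team_list) > 0
--     return team_list, preprocess_node_list, predict_node_list
-- ===== Notes on version B (the rewrite author's own statement) =====
-- stated objective: alternative
-- what changed: A builds the node list, slices it per team index, maps itemgetter(0) for preprocess nodes and re-scans the whole range with a membership filter for predict nodes; B makes one nested pass over the ranks, cutting a team every team_size ranks and classifying each rank by its in-team position (j==0 -> preprocess, else predict), so the slicing, the itemgetter map and the 'not in' filter all disappear.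
import Mathlib
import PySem

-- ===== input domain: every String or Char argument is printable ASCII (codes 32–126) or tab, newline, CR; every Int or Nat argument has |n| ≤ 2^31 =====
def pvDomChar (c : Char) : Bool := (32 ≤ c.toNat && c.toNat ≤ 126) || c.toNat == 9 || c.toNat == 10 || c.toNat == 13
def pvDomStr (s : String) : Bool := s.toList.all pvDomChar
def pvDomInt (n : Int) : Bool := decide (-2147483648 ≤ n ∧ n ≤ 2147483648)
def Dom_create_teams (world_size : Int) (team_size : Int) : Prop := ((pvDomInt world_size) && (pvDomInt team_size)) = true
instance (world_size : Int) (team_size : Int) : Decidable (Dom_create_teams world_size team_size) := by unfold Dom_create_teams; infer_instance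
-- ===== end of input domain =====

-- B replaces A's slice-per-team + itemgetter map + membership filter by one nested pass over the
-- ranks that classifies each rank by its in-team position (objective: alternative decomposition).

-- ===== PORT A =====
-- math.ceil((world_size-2)/team_size): float division then ceil; exact integer ceiling division
-- -((-(world_size-2)) // team_size) for |arguments| ≤ 2^31 (the float quotient cannot cross an
-- integer at these magnitudes), which is how it is ported here.
def create_teams (world_size : Int) (team_size : Int) : List (List Int) × List Int × List Int :=
  let list_of_nodes := PySem.List.pyRange 2 world_size 1
  let nbr_of_teams := -(PySem.Int.floordiv (-(world_size - 2)) team_size)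
  let team_list := (PySem.List.pyRange 0 nbr_of_teams 1).map
    (fun i => PySem.List.slice list_of_nodes (some (i * team_size)) (some ((i + 1) * team_size)))
  -- itemgetter(0): IndexError on an empty team is impossible under Pre_ (headD 0 is never the default there)
  let preprocess_node_list := team_list.map (fun t => t.headD 0)
  let predict_node_list := (PySem.List.pyRange 2 world_size 1).filter
    (fun i => !(preprocess_node_list.contains i))
  -- assert len(team_list) > 0 : holds under Pre_ (AssertionError outside is excluded by Pre_)
  (team_list, preprocess_node_list, predict_node_list)

-- ===== PORT B =====
-- inner 'for j in range(team_size)' with the 'if rank >= world_size: break';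
-- returns (team, preprocess additions, predict additions, rank after the loop)
def ctAltInner (ws ts : Int) (rank j : Int) : List Int × List Int × List Int × Int :=
  if h : j < ts ∧ rank < ws then
    let r := ctAltInner ws ts (rank + 1) (j + 1)
    (rank :: r.1,
     (if j == 0 then rank :: r.2.1 else r.2.1),
     (if j == 0 then r.2.2.1 else rank :: r.2.2.1),
     r.2.2.2)
  else ([], [], [], rank)
termination_by (ts - j).toNat
decreasing_by omega

-- outer 'for _t in range(nbr_of_teams)' carrying the running rank
def ctAltOuter (ws ts : Int) (rank : Int) : Nat → List (List Int) × List Int × List Int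
  | 0 => ([], [], [])
  | n + 1 =>
    let r := ctAltInner ws ts rank 0
    let rest := ctAltOuter ws ts r.2.2.2 n
    (r.1 :: rest.1, r.2.1 ++ rest.2.1, r.2.2.1 ++ rest.2.2)

def create_teams_alt (world_size : Int) (team_size : Int) : List (List Int) × List Int × List Int :=
  let nbr_of_teams := -(PySem.Int.floordiv (-(world_size - 2)) team_size)
  -- assert len(team_list) > 0 : holds under Pre_
  ctAltOuter world_size team_size 2 nbr_of_teams.toNat

-- ===== PRECONDITION & SPEC =====
-- Pre_ excludes exactly the inputs where A raises: team_size = 0 (ZeroDivisionError),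
-- world_size ≤ 2 or team_size < 0 (AssertionError, or IndexError from itemgetter(0) on an
-- empty team when world_size ≤ 1 ∧ team_size ≤ -1); A returns on every other input.
def Pre_create_teams (world_size : Int) (team_size : Int) : Prop :=
  3 ≤ world_size ∧ 1 ≤ team_size
instance (world_size : Int) (team_size : Int) : Decidable (Pre_create_teams world_size team_size) := by
  unfold Pre_create_teams; infer_instance

def pvWitness_create_teams : Int × Int := (10, 3)

def Spec_create_teams (world_size : Int) (team_size : Int) (out : List (List Int) × List Int × List Int) : Prop := out = create_teams_alt world_size team_size
instance (world_size : Int) (team_size : Int) (out : List (List Int) × List Int × List Int) : Decidable (Spec_create_teams world_size team_size out) := by unfold Spec_create_teams; infer_instance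

-- ===== CLAIM (what is proved, stated in full; the proofs are below) =====
def Claim_equal_create_teams : Prop := ∀ (world_size : Int) (team_size : Int), Dom_create_teams world_size team_size → Pre_create_teams world_size team_size → Spec_create_teams world_size team_size (create_teams world_size team_size)

-- ===== LEMMAS AND PROOFS =====

lemma drop_pyRange (k : Nat) : ∀ (a b : Int),
    (PySem.List.pyRange a b 1).drop k = PySem.List.pyRange (a + k) b 1 := by
  induction k with
  | zero => intro a b; simp
  | succ k ih =>
    intro a b
    by_cases hab : a < b
    · rw [PySem.List.pyRange_one_cons hab, List.drop_succ_cons, ih]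
      congr 1; push_cast; ring
    · rw [PySem.List.pyRange_one_eq_nil (by omega), PySem.List.pyRange_one_eq_nil (by push_cast; omega)]
      simp

lemma take_pyRange (k : Nat) : ∀ (a b : Int),
    (PySem.List.pyRange a b 1).take k = PySem.List.pyRange a (min (a + k) b) 1 := by
  induction k with
  | zero =>
    intro a b
    rw [List.take_zero]
    exact (PySem.List.pyRange_one_eq_nil (by push_cast; omega)).symm
  | succ k ih =>
    intro a b
    by_cases hab : a < b
    · rw [PySem.List.pyRange_one_cons hab, List.take_succ_cons, ih]
      have h2 : a + ((k + 1 : Nat) : Int) = a + 1 + (k : Int) := by push_cast; ring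
      rw [h2]
      exact (PySem.List.pyRange_one_cons (by omega)).symm
    · rw [PySem.List.pyRange_one_eq_nil (le_of_not_gt hab), List.take_nil]
      exact (PySem.List.pyRange_one_eq_nil (by push_cast; omega)).symm

-- the three closed forms of A's result under Pre_

lemma ctAltInner_pos (ws ts : Int) : ∀ (fuel : Nat) (rank j : Int), (ts - j).toNat = fuel →
    0 < j → j ≤ ts → rank ≤ ws →
    ctAltInner ws ts rank j =
      (PySem.List.pyRange rank (min (rank + (ts - j)) ws) 1, [],
       PySem.List.pyRange rank (min (rank + (ts - j)) ws) 1, min (rank + (ts - j)) ws) := by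
  intro fuel
  induction fuel with
  | zero =>
    intro rank j hf hj hjts hr
    rw [ctAltInner]
    have hjt : j = ts := by omega
    rw [dif_neg (by omega)]
    have : min (rank + (ts - j)) ws = rank := by omega
    rw [this, PySem.List.pyRange_one_eq_nil (by omega)]
  | succ fuel ih =>
    intro rank j hf hj hjts hr
    rw [ctAltInner]
    by_cases hcond : j < ts ∧ rank < ws
    · rw [dif_pos hcond]
      have hrec := ih (rank + 1) (j + 1) (by omega) (by omega) (by omega) (by omega)
      have he : rank + 1 + (ts - (j + 1)) = rank + (ts - j) := by ring
      rw [he] at hrec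
      simp only [hrec]
      have hne : (j == 0) = false := by simp; omega
      rw [hne]
      simp only [Bool.false_eq_true, if_false]
      have hcons : rank < min (rank + (ts - j)) ws := by omega
      rw [← PySem.List.pyRange_one_cons hcons]
    · rw [dif_neg hcond]
      -- here rank = ws (since j < ts is forced false? no: fuel ≥ 1 means j < ts) so rank = ws
      have hrw : rank = ws := by omega
      have : min (rank + (ts - j)) ws = rank := by omega
      rw [this, PySem.List.pyRange_one_eq_nil (by omega)]

lemma ctAltInner_zero (ws ts rank : Int) (hts : 0 < ts) (hr : rank < ws) :
    ctAltInner ws ts rank 0 =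
      (PySem.List.pyRange rank (min (rank + ts) ws) 1, [rank],
       PySem.List.pyRange (rank + 1) (min (rank + ts) ws) 1, min (rank + ts) ws) := by
  rw [ctAltInner, dif_pos ⟨by omega, hr⟩]
  have hrec := ctAltInner_pos ws ts _ (rank + 1) 1 rfl (by omega) (by omega) (by omega)
  have he : rank + 1 + (ts - 1) = rank + ts := by ring
  rw [he] at hrec
  simp only [show (0:Int)+1 = 1 from by norm_num, hrec]
  simp only [BEq.rfl, if_true]
  have hcons : rank < min (rank + ts) ws := by omega
  rw [← PySem.List.pyRange_one_cons hcons]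

lemma ctAltOuter_spec (ws ts : Int) (hts : 0 < ts) : ∀ (n : Nat) (rank : Int),
    (∀ k : Nat, k < n → rank + (k : Int) * ts < ws) →
    ctAltOuter ws ts rank n =
      ((List.range n).map (fun (k : Nat) => PySem.List.pyRange (rank + (k : Int) * ts) (min (rank + ((k : Int) + 1) * ts) ws) 1),
       (List.range n).map (fun (k : Nat) => rank + (k : Int) * ts),
       (List.range n).flatMap (fun (k : Nat) => PySem.List.pyRange (rank + (k : Int) * ts + 1) (min (rank + ((k : Int) + 1) * ts) ws) 1)) := by
  have hprm : ∀ (a a' x x' : Int), a = a' → x = x' →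
      PySem.List.pyRange a (min x ws) 1 = PySem.List.pyRange a' (min x' ws) 1 := by
    intro a a' x x' h1 h2; rw [h1, h2]
  intro n
  induction n with
  | zero => intro rank _; simp [ctAltOuter]
  | succ n ih =>
    intro rank h
    have hr0 : rank < ws := by have := h 0 (by omega); simpa using this
    rw [ctAltOuter]
    simp only [ctAltInner_zero ws ts rank hts hr0]
    have ihm : ctAltOuter ws ts (min (rank + ts) ws) n =
        ((List.range n).map (fun (k : Nat) => PySem.List.pyRange (rank + ts + (k : Int) * ts) (min (rank + ts + ((k : Int) + 1) * ts) ws) 1),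
         (List.range n).map (fun (k : Nat) => rank + ts + (k : Int) * ts),
         (List.range n).flatMap (fun (k : Nat) => PySem.List.pyRange (rank + ts + (k : Int) * ts + 1) (min (rank + ts + ((k : Int) + 1) * ts) ws) 1)) := by
      rcases Nat.eq_zero_or_pos n with hn | hn
      · subst hn; simp [ctAltOuter]
      · have hmin : min (rank + ts) ws = rank + ts := by
          have := h 1 (by omega); simp at this; omega
        rw [hmin]
        exact ih (rank + ts) (by
          intro k hk
          have := h (k + 1) (by omega)
          push_cast at this ⊢
          linarith)
    rw [ihm]
    rw [List.range_succ_eq_map]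
    simp only [List.map_cons, List.map_map, List.flatMap_cons, List.flatMap_map,
      Function.comp_def, Prod.mk.injEq]
    refine ⟨?_, ?_, ?_⟩
    · congr 1
      · exact (hprm _ _ _ _ (by push_cast; ring) (by push_cast; ring)).symm
      · refine List.map_congr_left fun k _ => ?_
        exact hprm _ _ _ _ (by push_cast; ring) (by push_cast; ring)
    · rw [List.singleton_append]
      congr 1
      · push_cast; ring
      · refine List.map_congr_left fun k _ => ?_
        push_cast; ring
    · congr 1
      · exact (hprm _ _ _ _ (by push_cast; ring) (by push_cast; ring)).symm
      · refine List.flatMap_congr fun k _ => ?_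
        exact hprm _ _ _ _ (by push_cast; ring) (by push_cast; ring)

lemma filter_pred (ws ts : Int) (q : Nat) (hts : 1 ≤ ts) (hbr : ws - 2 ≤ (q : Int) * ts)
    (hq : ∀ k : Nat, k < q → 2 + (k : Int) * ts < ws) :
    ∀ (n k₀ : Nat), k₀ + n = q →
    (PySem.List.pyRange (2 + (k₀ : Int) * ts) ws 1).filter
        (fun r => !(((List.range q).map (fun (k : Nat) => 2 + (k : Int) * ts)).contains r)) =
      (List.range' k₀ n).flatMap
        (fun (k : Nat) => PySem.List.pyRange (2 + (k : Int) * ts + 1) (min (2 + ((k : Int) + 1) * ts) ws) 1) := by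
  intro n
  induction n with
  | zero =>
    intro k₀ hk
    have hkq : k₀ = q := by omega
    subst hkq
    rw [PySem.List.pyRange_one_eq_nil (by linarith)]
    simp
  | succ n ih =>
    intro k₀ hk
    have hk₀q : k₀ < q := by omega
    have hlo : 2 + (k₀ : Int) * ts < ws := hq k₀ hk₀q
    have hlom : 2 + (k₀ : Int) * ts < min (2 + ((k₀ : Int) + 1) * ts) ws := by
      refine lt_min ?_ hlo; nlinarith
    rw [PySem.List.pyRange_one_append (2 + (k₀ : Int) * ts) (min (2 + ((k₀ : Int) + 1) * ts) ws) ws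
      (le_of_lt hlom) (min_le_right _ _)]
    rw [List.filter_append]
    rw [PySem.List.pyRange_one_cons hlom, List.filter_cons]
    have hmemP : ((List.range q).map (fun (k : Nat) => 2 + (k : Int) * ts)).contains (2 + (k₀ : Int) * ts) = true := by
      simp only [List.contains_iff_mem, List.mem_map, List.mem_range]
      exact ⟨k₀, hk₀q, rfl⟩
    rw [hmemP]
    simp only [Bool.not_true, Bool.false_eq_true, if_false]
    have htail : (PySem.List.pyRange (2 + (k₀ : Int) * ts + 1) (min (2 + ((k₀ : Int) + 1) * ts) ws) 1).filter
        (fun r => !(((List.range q).map (fun (k : Nat) => 2 + (k : Int) * ts)).contains r)) =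
        PySem.List.pyRange (2 + (k₀ : Int) * ts + 1) (min (2 + ((k₀ : Int) + 1) * ts) ws) 1 := by
      refine List.filter_eq_self.mpr ?_
      intro r hr
      rw [PySem.List.mem_pyRange_one] at hr
      have hnot : r ∉ (List.range q).map (fun (k : Nat) => 2 + (k : Int) * ts) := by
        simp only [List.mem_map, List.mem_range, not_exists, not_and]
        intro k' hk' heq
        have hkk : (k₀ : Int) * ts < (k' : Int) * ts := by linarith [hr.1]
        have hlt : (k₀ : Int) < (k' : Int) := lt_of_mul_lt_mul_right hkk (by linarith)
        have hge : (k₀ : Int) + 1 ≤ (k' : Int) := by omega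
        have hmul : ((k₀ : Int) + 1) * ts ≤ (k' : Int) * ts :=
          mul_le_mul_of_nonneg_right hge (by linarith)
        have hmin := min_le_left (2 + ((k₀ : Int) + 1) * ts) ws
        linarith [hr.2]
      simpa [List.contains_iff_mem] using hnot
    rw [htail]
    have hrest : (PySem.List.pyRange (min (2 + ((k₀ : Int) + 1) * ts) ws) ws 1).filter
        (fun r => !(((List.range q).map (fun (k : Nat) => 2 + (k : Int) * ts)).contains r)) =
        (List.range' (k₀ + 1) n).flatMap
          (fun (k : Nat) => PySem.List.pyRange (2 + (k : Int) * ts + 1) (min (2 + ((k : Int) + 1) * ts) ws) 1) := by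
      by_cases hfits : 2 + ((k₀ : Int) + 1) * ts ≤ ws
      · rw [min_eq_left hfits]
        have hih := ih (k₀ + 1) (by omega)
        push_cast at hih
        exact hih
      · have hn0 : n = 0 := by
          by_contra hne
          have hlt : k₀ + 1 < q := by omega
          have := hq (k₀ + 1) hlt
          push_cast at this
          linarith
        subst hn0
        rw [min_eq_right (by linarith), PySem.List.pyRange_one_eq_nil (by omega)]
        simp
    rw [hrest, List.range'_succ, List.flatMap_cons]

lemma slice_chunk (ws ts : Int) (hts : 1 ≤ ts) (A : Int) (hA : 0 ≤ A) :
    PySem.List.slice (PySem.List.pyRange 2 ws 1) (some A) (some (A + ts)) =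
    PySem.List.pyRange (2 + A) (min (2 + A + ts) ws) 1 := by
  rw [PySem.List.slice_toNat _ hA (by linarith), drop_pyRange, take_pyRange]
  have h1 : (2 : Int) + (A.toNat : Int) = 2 + A := by omega
  have h2 : (((A + ts).toNat - A.toNat : Nat) : Int) = ts := by omega
  rw [h1, h2]

lemma teams_closed (ws ts : Int) (q : Nat) (hts : 1 ≤ ts) :
    (PySem.List.pyRange 0 (q : Int) 1).map
      (fun i => PySem.List.slice (PySem.List.pyRange 2 ws 1) (some (i * ts)) (some ((i + 1) * ts))) =
    (List.range q).map
      (fun (k : Nat) => PySem.List.pyRange (2 + (k : Int) * ts) (min (2 + ((k : Int) + 1) * ts) ws) 1) := by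
  rw [PySem.List.pyRange_one 0 (q : Int)]
  have hq0 : ((q : Int) - 0).toNat = q := by omega
  rw [hq0, List.map_map]
  refine List.map_congr_left fun k hk => ?_
  simp only [Function.comp_apply, zero_add]
  have hAB : ((k : Int) + 1) * ts = (k : Int) * ts + ts := by ring
  rw [hAB, slice_chunk ws ts hts _ (by positivity)]
  ring_nf

lemma pre_closed (ws ts : Int) (q : Nat) (hts : 1 ≤ ts)
    (hq : ∀ k : Nat, k < q → 2 + (k : Int) * ts < ws) :
    ((List.range q).map
      (fun (k : Nat) => PySem.List.pyRange (2 + (k : Int) * ts) (min (2 + ((k : Int) + 1) * ts) ws) 1)).map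
        (fun t => t.headD 0) =
    (List.range q).map (fun (k : Nat) => 2 + (k : Int) * ts) := by
  rw [List.map_map]
  refine List.map_congr_left fun k hk => ?_
  simp only [Function.comp_apply]
  rw [PySem.List.pyRange_one_cons (lt_min (by nlinarith) (hq k (List.mem_range.mp hk)))]
  rfl

-- ===== VERDICT (by name: the statement is the Claim_ definition above) =====
theorem create_teams_spec : Claim_equal_create_teams := by
  intro ws ts hdom hpre
  obtain ⟨hws, hts⟩ := hpre
  unfold Spec_create_teams
  show create_teams ws ts = create_teams_alt ws ts
  simp only [create_teams, create_teams_alt]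
  set nbr := -(PySem.Int.floordiv (-(ws - 2)) ts) with hnbr
  have hbr : (nbr - 1) * ts < ws - 2 ∧ ws - 2 ≤ nbr * ts :=
    (PySem.Int.neg_floordiv_neg_eq_iff_of_pos (by linarith)).mp rfl
  have hpos : 0 < nbr := by nlinarith [hbr.1, hbr.2]
  set q := nbr.toNat with hqdef
  have hq' : (q : Int) = nbr := Int.toNat_of_nonneg (by omega)
  have hq : ∀ k : Nat, k < q → 2 + (k : Int) * ts < ws := by
    intro k hk
    have hk' : (k : Int) ≤ nbr - 1 := by omega
    have := mul_le_mul_of_nonneg_right hk' (by linarith : (0 : Int) ≤ ts)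
    linarith [hbr.1]
  rw [← hq']
  rw [teams_closed ws ts q hts, pre_closed ws ts q hts hq]
  have hfp := filter_pred ws ts q hts (by rw [hq']; exact hbr.2) hq q 0 (by omega)
  have h0 : (2 : Int) + ((0 : Nat) : Int) * ts = 2 := by norm_num
  rw [h0, ← List.range_eq_range'] at hfp
  rw [hfp]
  rw [ctAltOuter_spec ws ts (by linarith) q 2 (by intro k hk; have := hq k hk; linarith)]
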